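-- pv_equiv track=rewrite | github.com/whiteshark05/Competitive-Programming | Codeforce/Div 3/Codeforces Round #839 (Div. 3)/C.py | solve
-- ===== SOURCE A (Python) =====
-- def solve(k,n):
--     cur = 1
--     dif = 0
--     ans = []
--     for _ in range(k):
--         cur += dif
--         ans.append(cur)
--         dif += 1
--
--     return ans
-- ===== SOURCE B (Python) =====
-- def solve(k, n):
--     # closed form: the j-th element is 1 plus the j-th triangular number
--     return [1 + j * (j + 1) // 2 for j in range(k)]
-- ===== Notes on version B (the rewrite author's own statement) =====
-- stated objective: simpler
-- what changed: Replaces the stateful loop carrying running accumulators cur and dif with a closed-form per-index formula 1 + j*(j+1)//2.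
import Mathlib
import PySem

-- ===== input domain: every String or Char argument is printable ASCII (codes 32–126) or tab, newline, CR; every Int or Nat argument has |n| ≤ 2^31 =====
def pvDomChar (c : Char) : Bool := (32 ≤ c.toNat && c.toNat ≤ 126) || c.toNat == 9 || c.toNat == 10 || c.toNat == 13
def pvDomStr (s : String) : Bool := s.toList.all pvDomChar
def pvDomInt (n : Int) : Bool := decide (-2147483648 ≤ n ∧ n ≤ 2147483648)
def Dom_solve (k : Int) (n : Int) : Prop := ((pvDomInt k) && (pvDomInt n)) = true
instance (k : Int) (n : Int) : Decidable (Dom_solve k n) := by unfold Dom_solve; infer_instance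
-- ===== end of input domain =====

-- B replaces A's running accumulators (cur, dif) with the closed form 1 + j*(j+1)//2 per index (objective: simpler).

-- ===== PORT A =====
-- A's loop state: (cur, dif, ans); each iteration does cur += dif; ans.append(cur); dif += 1.
def solve (k : Int) (n : Int) : List Int :=
  let st := (PySem.List.pyRange 0 k 1).foldl
    (fun (st : Int × Int × List Int) _ =>
      let cur := st.1 + st.2.1
      (cur, st.2.1 + 1, st.2.2 ++ [cur]))
    (1, 0, [])
  st.2.2

-- ===== PORT B =====
def solve_alt (k : Int) (n : Int) : List Int :=
  (PySem.List.pyRange 0 k 1).map (fun j => 1 + PySem.Int.floordiv (j * (j + 1)) 2)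

-- ===== PRECONDITION & SPEC =====
def Spec_solve (k : Int) (n : Int) (out : List Int) : Prop := out = solve_alt k n
instance (k : Int) (n : Int) (out : List Int) : Decidable (Spec_solve k n out) := by unfold Spec_solve; infer_instance

-- ===== CLAIM (what is proved, stated in full; the proofs are below) =====
def Claim_equal_solve : Prop := ∀ (k : Int) (n : Int), Dom_solve k n → Spec_solve k n (solve k n)

-- ===== LEMMAS AND PROOFS =====

-- invariant of A's fold over the first m iterations
lemma solve_fold_inv (m : Nat) :
    (List.range m).foldl
      (fun (st : Int × Int × List Int) _ =>
        let cur := st.1 + st.2.1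
        (cur, st.2.1 + 1, st.2.2 ++ [cur]))
      (1, 0, []) =
    (1 + (m : Int) * ((m : Int) - 1) / 2, (m : Int),
      (List.range m).map (fun j : Nat => 1 + (j : Int) * ((j : Int) + 1) / 2)) := by
  induction m with
  | zero => simp
  | succ p ih =>
      rw [List.range_succ, List.foldl_append, ih, List.map_append]
      simp only [List.foldl_cons, List.foldl_nil, List.map_cons, List.map_nil]
      push_cast
      refine Prod.ext ?_ (Prod.ext ?_ ?_) <;> simp <;>
        (have h1 : ((p : Int) + 1) * (p : Int) = (p : Int) * ((p : Int) - 1) + 2 * (p : Int) := by ring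
         have h2 : (p : Int) * ((p : Int) + 1) = (p : Int) * ((p : Int) - 1) + 2 * (p : Int) := by ring
         omega)

lemma solve_eq_alt (k n : Int) : solve k n = solve_alt k n := by
  unfold solve solve_alt
  rw [PySem.List.pyRange_one]
  simp only [Int.sub_zero, List.foldl_map, List.map_map]
  rw [solve_fold_inv]
  refine List.map_congr_left fun j _ => ?_
  simp only [Function.comp_apply]
  rw [PySem.Int.floordiv_eq_ediv_of_pos (by norm_num)]
  push_cast
  ring_nf

-- ===== VERDICT (by name: the statement is the Claim_ definition above) =====
theorem solve_spec : Claim_equal_solve := by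
  intro k n _
  unfold Spec_solve
  exact solve_eq_alt k n
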